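-- pv_equiv track=rewrite | github.com/thirupathireddy665/crossbeam | src/bustle_generated_properties.py | is_contains_slash
-- ===== SOURCE A (Python) =====
-- AllTrue = -1
--
-- Mixed = 0
--
-- AllFalse = 1
--
-- def is_contains_slash(inputs):
--     is_true_present = False
--     is_false_present = False
--     for program_input in inputs:
--         if "/" in program_input:
--             is_true_present = True
--         else:
--             is_false_present = True
--
--     if is_true_present and is_false_present:
--         return Mixed
--     elif is_true_present:
--         return AllTrue
--     else:
--         return AllFalse
-- ===== SOURCE B (Python) =====
-- AllTrue = -1
-- Mixed = 0
-- AllFalse = 1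
--
-- def is_contains_slash(inputs):
--     if not inputs:
--         return AllFalse
--     return _classify(inputs)
--
-- def _classify(xs):
--     # divide and conquer: classify each half, equal labels keep, unequal -> Mixed
--     if len(xs) == 1:
--         return AllTrue if "/" in xs[0] else AllFalse
--     mid = len(xs) // 2
--     left = _classify(xs[:mid])
--     right = _classify(xs[mid:])
--     return left if left == right else Mixed
-- ===== Notes on version B (the rewrite author's own statement) =====
-- stated objective: alternative
-- what changed: Replaces the linear flag-tracking pass with a divide-and-conquer recursion that classifies each half and merges the two labels (equal labels kept, unequal labels become Mixed).
import Mathlib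
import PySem

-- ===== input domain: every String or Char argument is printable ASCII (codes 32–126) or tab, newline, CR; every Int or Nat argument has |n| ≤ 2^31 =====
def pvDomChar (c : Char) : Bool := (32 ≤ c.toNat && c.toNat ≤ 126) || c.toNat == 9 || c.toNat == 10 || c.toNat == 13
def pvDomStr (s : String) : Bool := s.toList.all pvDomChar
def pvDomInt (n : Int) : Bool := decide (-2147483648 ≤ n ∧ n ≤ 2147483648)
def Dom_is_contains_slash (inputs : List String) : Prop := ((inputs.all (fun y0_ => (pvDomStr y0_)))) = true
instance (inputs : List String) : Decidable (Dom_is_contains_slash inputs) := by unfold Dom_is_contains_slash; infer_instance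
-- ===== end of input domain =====

-- B replaces A's linear flag-tracking pass by a divide-and-conquer recursion merging half-labels (objective: alternative).
-- ===== PORT A =====
-- literal port of A: fold carrying the two boolean flags, then the branch chain
def is_contains_slash (inputs : List String) : Int :=
  let st := inputs.foldl
    (fun (st : Bool × Bool) program_input =>
      if PySem.Str.isIn "/" program_input then (true, st.2) else (st.1, true))
    (false, false)
  if st.1 && st.2 then 0
  else if st.1 then -1
  else 1

-- ===== PORT B =====
-- port of B's helper _classify (Python only calls it on nonempty lists; the [] arm is a totality guard)
def pvClassify : List String → Int
  | [] => 1
  | [x] => if PySem.Str.isIn "/" x then -1 else 1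
  | x :: y :: rest =>
      let xs := x :: y :: rest
      let mid := xs.length / 2
      let left := pvClassify (xs.take mid)
      let right := pvClassify (xs.drop mid)
      if left = right then left else 0
  termination_by xs => xs.length
  decreasing_by
    · simp; omega
    · simp; omega

def is_contains_slash_alt (inputs : List String) : Int :=
  match inputs with
  | [] => 1
  | _ => pvClassify inputs

-- ===== PRECONDITION & SPEC =====
def Spec_is_contains_slash (inputs : List String) (out : Int) : Prop := out = is_contains_slash_alt inputs
instance (inputs : List String) (out : Int) : Decidable (Spec_is_contains_slash inputs out) := by unfold Spec_is_contains_slash; infer_instance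

-- ===== CLAIM (what is proved, stated in full; the proofs are below) =====
def Claim_equal_is_contains_slash : Prop := ∀ (inputs : List String), Dom_is_contains_slash inputs → Spec_is_contains_slash inputs (is_contains_slash inputs)

-- ===== LEMMAS AND PROOFS =====

-- the common characterisation: code of a list by which kinds of elements it contains
def pvCode (xs : List String) : Int :=
  if xs.any (fun x => PySem.Str.isIn "/" x) && xs.any (fun x => ! PySem.Str.isIn "/" x) then 0
  else if xs.any (fun x => PySem.Str.isIn "/" x) then -1
  else 1

lemma flags_eq_any {a : Type} (p : a -> Bool) (xs : List a) (u v : Bool) :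
    xs.foldl
      (fun (st : Bool × Bool) x => if p x then (true, st.2) else (st.1, true))
      (u, v)
    = (u || xs.any p, v || xs.any (fun x => ! p x)) := by
  induction xs generalizing u v with
  | nil => simp
  | cons x xs ih =>
    cases hx : p x <;> simp [hx, ih]

lemma any_or_anyNot {a : Type} (p : a -> Bool) (xs : List a) (h : xs ≠ []) :
    (xs.any p || xs.any (fun x => ! p x)) = true := by
  cases xs with
  | nil => exact absurd rfl h
  | cons x xs => cases hx : p x <;> simp [hx]

lemma code_append (l r : List String) (hl : l ≠ []) (hr : r ≠ []) :
    (if pvCode l = pvCode r then pvCode l else 0) = pvCode (l ++ r) := by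
  have h1 := any_or_anyNot (fun x => PySem.Str.isIn "/" x) l hl
  have h2 := any_or_anyNot (fun x => PySem.Str.isIn "/" x) r hr
  unfold pvCode
  rw [List.any_append, List.any_append]
  generalize l.any (fun x => PySem.Str.isIn "/" x) = a at h1 ⊢
  generalize l.any (fun x => ! PySem.Str.isIn "/" x) = b at h1 ⊢
  generalize r.any (fun x => PySem.Str.isIn "/" x) = c at h2 ⊢
  generalize r.any (fun x => ! PySem.Str.isIn "/" x) = d at h2 ⊢
  revert a b c d
  decide

lemma classify_merge (x y : String) (rest : List String) :
    pvClassify (List.take ((x :: y :: rest).length / 2) (x :: y :: rest)) = pvCode (List.take ((x :: y :: rest).length / 2) (x :: y :: rest)) ->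
    pvClassify (List.drop ((x :: y :: rest).length / 2) (x :: y :: rest)) = pvCode (List.drop ((x :: y :: rest).length / 2) (x :: y :: rest)) ->
    pvClassify (x :: y :: rest) = pvCode (x :: y :: rest) := by
  intro ihl ihr
  rw [pvClassify]
  simp only [ihl, ihr]
  set xs := x :: y :: rest with hxs
  set mid := xs.length / 2 with hmid
  have hlen : xs.length = rest.length + 2 := by simp [hxs]
  have hl : List.take mid xs ≠ [] := by
    intro h
    have := congrArg List.length h
    simp at this
    omega
  have hr : List.drop mid xs ≠ [] := by
    intro h
    have := congrArg List.length h
    simp at this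
    omega
  conv_rhs => rw [← List.take_append_drop mid xs]
  exact code_append _ _ hl hr

lemma classify_eq_code (xs : List String) : pvClassify xs = pvCode xs := by
  induction xs using pvClassify.induct with
  | case1 => simp [pvClassify, pvCode]
  | case2 x _ => simp [pvClassify, pvCode]
  | case3 x _ => simp [pvClassify, pvCode]
  | case4 x y rest _ _ _ _ _ ihl ihr => exact classify_merge x y rest ihl ihr
  | case5 x y rest _ _ _ _ _ ihl ihr => exact classify_merge x y rest ihl ihr

-- ===== VERDICT (by name: the statement is the Claim_ definition above) =====
theorem is_contains_slash_spec : Claim_equal_is_contains_slash := by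
  intro inputs _
  unfold Spec_is_contains_slash is_contains_slash is_contains_slash_alt
  rw [flags_eq_any (fun x => PySem.Str.isIn "/" x)]
  cases inputs with
  | nil => simp
  | cons x xs =>
    rw [classify_eq_code]
    unfold pvCode
    simp only [Bool.false_or]
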